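-- pv_equiv track=rewrite | github.com/ORCBOLG-001/PYTHON_DATA_STRUCTURES-_AND_ALGORITHMS | CHAPTER_05_.py | funky
-- ===== SOURCE A (Python) =====
-- def funky(i,a,n,l):
--  if l==i:
--    return 0
--  else:
--   sum=0
--   for k in range(0,n):
--     sum=sum+a[i][k]
--   i=i+1
--   sum=sum+funky(i,a,n,l)
--   return sum
-- ===== SOURCE B (Python) =====
-- def funky(i, a, n, l):
--     # One comprehension: sum a[r][k] over the rectangle r in [i,l), k in [0,n).
--     return sum(a[r][k] for r in range(i, l) for k in range(n))
-- ===== Notes on version B (the rewrite author's own statement) =====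
-- stated objective: simpler
-- what changed: Replaces the recursion over rows by a single flat generator-sum over the index rectangle range(i,l) x range(n), with no explicit loop state or recursion.
import Mathlib
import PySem

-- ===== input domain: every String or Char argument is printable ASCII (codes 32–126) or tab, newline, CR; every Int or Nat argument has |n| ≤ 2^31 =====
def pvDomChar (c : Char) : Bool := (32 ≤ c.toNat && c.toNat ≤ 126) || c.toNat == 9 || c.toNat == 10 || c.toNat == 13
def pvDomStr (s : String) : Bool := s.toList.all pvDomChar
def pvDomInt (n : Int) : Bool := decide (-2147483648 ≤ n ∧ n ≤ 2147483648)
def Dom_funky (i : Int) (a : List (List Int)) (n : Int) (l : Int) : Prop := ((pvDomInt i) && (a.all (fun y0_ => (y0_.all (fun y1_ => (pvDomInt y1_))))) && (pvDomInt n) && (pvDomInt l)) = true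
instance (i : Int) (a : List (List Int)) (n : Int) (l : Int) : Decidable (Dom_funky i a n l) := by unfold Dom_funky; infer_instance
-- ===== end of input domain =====

-- B replaces A's recursion over rows by one flat generator-sum over the index rectangle (simpler; same cost).

-- ===== PORT A =====
-- Python's `for k in range(0,n): sum = sum + a[i][k]` (A's inner loop).
def rowSumA (a : List (List Int)) (n : Int) (i : Int) : Int :=
  (PySem.List.pyRange 0 n 1).foldl
    (fun s k => s + (PySem.List.pyGetD ((PySem.List.pyGet? a i).getD []) k 0)) 0

-- A's recursion, with fuel (l-i).toNat standing for the recursion depth; Pre_ guarantees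
-- i ≤ l so the fuel is exact and the `l == i` test fires exactly when the fuel runs out.
def funkyGoA (a : List (List Int)) (n l : Int) : Nat → Int → Int
  | 0, _ => 0
  | fuel + 1, i =>
    if l == i then 0
    else rowSumA a n i + funkyGoA a n l fuel (i + 1)

def funky (i : Int) (a : List (List Int)) (n : Int) (l : Int) : Int :=
  funkyGoA a n l (l - i).toNat i

-- ===== PORT B =====
-- `sum(a[r][k] for r in range(i, l) for k in range(n))`: the flat list of the
-- rectangle's entries, then its sum.
def funky_alt (i : Int) (a : List (List Int)) (n : Int) (l : Int) : Int :=
  ((PySem.List.pyRange i l 1).flatMap (fun r =>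
      (PySem.List.pyRange 0 n 1).map (fun k =>
        PySem.List.pyGetD ((PySem.List.pyGet? a r).getD []) k 0))).sum

-- ===== PRECONDITION & SPEC =====
-- Pre_ excludes exactly the inputs where Python A does not return: l < i (infinite
-- recursion) and out-of-range row/column indexing (IndexError).
def Pre_funky (i : Int) (a : List (List Int)) (n : Int) (l : Int) : Prop :=
  i ≤ l ∧ (i = l ∨ n ≤ 0 ∨
    (-(a.length : Int) ≤ i ∧ l ≤ (a.length : Int) ∧
     ∀ j ∈ List.range (l - i).toNat,
       n ≤ (((PySem.List.pyGet? a (i + j)).getD []).length : Int)))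
instance (i : Int) (a : List (List Int)) (n : Int) (l : Int) : Decidable (Pre_funky i a n l) := by unfold Pre_funky; infer_instance

def pvWitness_funky : Int × List (List Int) × Int × Int := (0, [[1, 2], [3, 4]], 2, 2)

def Spec_funky (i : Int) (a : List (List Int)) (n : Int) (l : Int) (out : Int) : Prop := out = funky_alt i a n l
instance (i : Int) (a : List (List Int)) (n : Int) (l : Int) (out : Int) : Decidable (Spec_funky i a n l out) := by unfold Spec_funky; infer_instance

-- ===== CLAIM (what is proved, stated in full; the proofs are below) =====
def Claim_equal_funky : Prop := ∀ (i : Int) (a : List (List Int)) (n : Int) (l : Int), Dom_funky i a n l → Pre_funky i a n l → Spec_funky i a n l (funky i a n l)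

-- ===== LEMMAS AND PROOFS =====

-- A's inner foldl is the sum of B's row of entries.
theorem rowSumA_eq_sum (a : List (List Int)) (n i : Int) :
    rowSumA a n i =
      ((PySem.List.pyRange 0 n 1).map (fun k =>
        PySem.List.pyGetD ((PySem.List.pyGet? a i).getD []) k 0)).sum := by
  unfold rowSumA
  rw [PySem.List.foldl_add]
  simp

theorem goA_eq_rect (a : List (List Int)) (n l : Int) :
    ∀ (fuel : Nat) (i : Int), (l - i).toNat = fuel →
      funkyGoA a n l fuel i =
        ((PySem.List.pyRange i l 1).flatMap (fun r =>
          (PySem.List.pyRange 0 n 1).map (fun k =>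
            PySem.List.pyGetD ((PySem.List.pyGet? a r).getD []) k 0))).sum := by
  intro fuel
  induction fuel with
  | zero =>
    intro i h
    have hle : l ≤ i := by omega
    rw [PySem.List.pyRange_one_eq_nil hle]
    simp [funkyGoA]
  | succ f ih =>
    intro i h
    have hlt : i < l := by omega
    have hne : ¬ l = i := by omega
    rw [PySem.List.pyRange_one_cons hlt]
    simp only [funkyGoA, beq_iff_eq, hne, if_false, List.flatMap_cons, List.sum_append]
    rw [ih (i + 1) (by omega), rowSumA_eq_sum]

-- ===== VERDICT (by name: the statement is the Claim_ definition above) =====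
theorem funky_spec : Claim_equal_funky := by
  intro i a n l _ _
  unfold Spec_funky funky funky_alt
  exact goA_eq_rect a n l _ i rfl
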